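-- pv_equiv track=rewrite | github.com/MLeongQA/qa-python-assessment-2a | programs/python2.py | eight
-- ===== SOURCE A (Python) =====
-- def eight(string, num):
--
--     new_string = string
--
--     if num == 1:
--         mid = len(new_string)//2
--         remainder = (len(new_string)+1)%2
--         new_string = new_string[:mid-remainder]+new_string[mid+1:]
--         return new_string
--     else:
--         while len(string)-len(new_string)< num:
--             mid = len(new_string)//2
--             remainder = (len(new_string)+1)%2
--             new_string = new_string[:mid-remainder]+new_string[mid+1:]
--         return new_string
-- ===== SOURCE B (Python) =====
-- def eight(string, num):
--     # Closed form: A always strips a symmetric center block; compute its size once and slice.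
--     n = len(string)
--     if num < 1:
--         return string
--     removed = num if (num - n) % 2 == 0 else num + 1
--     keep = max(0, (n - removed) // 2)
--     return string[:keep] + string[n - keep:]
-- ===== Notes on version B (the rewrite author's own statement) =====
-- stated objective: faster
-- what changed: A repeatedly deletes the middle one or two characters in a while loop of repeated slicing; B computes the total size of the removed symmetric center block in closed form (num rounded up to the parity of len) and returns a single prefix+suffix slice.
import Mathlib
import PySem

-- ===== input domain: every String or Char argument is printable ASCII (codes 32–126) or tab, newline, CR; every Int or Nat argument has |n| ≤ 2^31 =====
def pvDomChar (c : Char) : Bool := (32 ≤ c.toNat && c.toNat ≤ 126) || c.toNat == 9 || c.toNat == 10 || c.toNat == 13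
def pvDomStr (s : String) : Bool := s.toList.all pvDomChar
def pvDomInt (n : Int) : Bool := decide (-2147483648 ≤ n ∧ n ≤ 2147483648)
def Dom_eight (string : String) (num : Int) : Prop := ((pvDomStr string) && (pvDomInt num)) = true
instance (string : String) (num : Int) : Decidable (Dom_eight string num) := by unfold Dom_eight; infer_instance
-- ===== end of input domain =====

-- B replaces A's repeated middle-character deletion loop by one closed-form center slice.

-- ===== PORT A =====
-- one loop body / num==1 body: new_string[:mid-remainder] + new_string[mid+1:]
def eightStep (l : List Char) : List Char :=
  let mid := PySem.Int.floordiv (l.length : Int) 2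
  let remainder := PySem.Int.mod ((l.length : Int) + 1) 2
  PySem.List.slice l none (some (mid - remainder)) ++ PySem.List.slice l (some (mid + 1)) none

-- the while loop of A's else branch; fuel = initial length + 1 always suffices under Pre_
def eightLoop (fuel : Nat) (n0 num : Int) (cur : List Char) : List Char :=
  match fuel with
  | 0 => cur
  | f + 1 =>
      if n0 - (cur.length : Int) < num then eightLoop f n0 num (eightStep cur) else cur

def eight (string : String) (num : Int) : String :=
  let l := string.toList
  if num = 1 then String.ofList (eightStep l)
  else String.ofList (eightLoop (l.length + 1) (l.length : Int) num l)

-- ===== PORT B =====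
def eight_alt (string : String) (num : Int) : String :=
  let l := string.toList
  let n : Int := l.length
  if num < 1 then string
  else
    let removed := if PySem.Int.mod (num - n) 2 = 0 then num else num + 1
    let keep := max 0 (PySem.Int.floordiv (n - removed) 2)
    String.ofList (PySem.List.slice l none (some keep) ++ PySem.List.slice l (some (n - keep)) none)

-- ===== PRECONDITION & SPEC =====
-- Pre_ excludes exactly the inputs on which A never returns: for num ≥ 2 and num > len(string)
-- the while loop reaches the empty string and then loops forever (the empty string re-slices to itself).
def Pre_eight (string : String) (num : Int) : Prop :=
  num ≤ 1 ∨ num ≤ (string.toList.length : Int)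
instance (string : String) (num : Int) : Decidable (Pre_eight string num) := by
  unfold Pre_eight; infer_instance

def pvWitness_eight : String × Int := ("abcde", 3)

def Spec_eight (string : String) (num : Int) (out : String) : Prop := out = eight_alt string num
instance (string : String) (num : Int) (out : String) : Decidable (Spec_eight string num out) := by
  unfold Spec_eight; infer_instance

-- ===== CLAIM (what is proved, stated in full; the proofs are below) =====
def Claim_equal_eight : Prop := ∀ (string : String) (num : Int),
  Dom_eight string num → Pre_eight string num → Spec_eight string num (eight string num)

-- ===== LEMMAS AND PROOFS =====

lemma eightLoop_succ (f : Nat) (n0 num : Int) (cur : List Char) :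
    eightLoop (f + 1) n0 num cur =
      if n0 - (cur.length : Int) < num then eightLoop f n0 num (eightStep cur) else cur := rfl

lemma drop_append_ge {l₁ l₂ : List Char} {n : Nat} (h : l₁.length ≤ n) :
    (l₁ ++ l₂).drop n = l₂.drop (n - l₁.length) := by
  rw [List.drop_append]
  simp [List.drop_eq_nil_of_le h]

-- the step on an odd-length list removes the single center character
lemma eightStep_odd (l : List Char) (h : l.length % 2 = 1) :
    eightStep l = l.take (l.length / 2) ++ l.drop (l.length - l.length / 2) := by
  simp only [eightStep]
  rw [PySem.Int.floordiv_eq_ediv_of_pos (by omega), PySem.Int.mod_eq_emod_of_pos (by omega)]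
  have h1 : ((l.length : Int) + 1) % 2 = 0 := by omega
  have h2 : (l.length : Int) / 2 - 0 = ((l.length / 2 : Nat) : Int) := by omega
  have h3 : (l.length : Int) / 2 + 1 = ((l.length - l.length / 2 : Nat) : Int) := by omega
  rw [h1, h2, h3, PySem.List.slice_to_natCast, PySem.List.slice_from_natCast]

-- the step on an even-length list removes the two center characters (and fixes the empty list)
lemma eightStep_even (l : List Char) (h : l.length % 2 = 0) :
    eightStep l = l.take (l.length / 2 - 1) ++ l.drop (l.length - (l.length / 2 - 1)) := by
  rcases Nat.eq_zero_or_pos l.length with h0 | h0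
  · have : l = [] := List.eq_nil_of_length_eq_zero h0
    subst this; decide
  · simp only [eightStep]
    rw [PySem.Int.floordiv_eq_ediv_of_pos (by omega), PySem.Int.mod_eq_emod_of_pos (by omega)]
    have h1 : ((l.length : Int) + 1) % 2 = 1 := by omega
    have h2 : (l.length : Int) / 2 - 1 = ((l.length / 2 - 1 : Nat) : Int) := by omega
    have h3 : (l.length : Int) / 2 + 1 = ((l.length - (l.length / 2 - 1) : Nat) : Int) := by omega
    rw [h1, h2, h3, PySem.List.slice_to_natCast, PySem.List.slice_from_natCast]

-- loop invariant: from the symmetric state  take a ++ drop (m-a)  the loop ends at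
-- a = (m - num)/2, i.e. at the closed-form keep that B computes
lemma eightLoop_inv (l : List Char) (num : Int) (hnum : 2 ≤ num) (hle : num ≤ (l.length : Int)) :
    ∀ (fuel a : Nat), (l.length - num.toNat) / 2 ≤ a → 2 * a ≤ l.length →
      a - (l.length - num.toNat) / 2 < fuel →
      eightLoop fuel (l.length : Int) num (l.take a ++ l.drop (l.length - a)) =
        l.take ((l.length - num.toNat) / 2) ++ l.drop (l.length - (l.length - num.toNat) / 2) := by
  intro fuel
  induction fuel with
  | zero => intro a _ _ hf; omega
  | succ f ih =>
      intro a hka h2a hf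
      set m := l.length with hm
      set k := (m - num.toNat) / 2 with hk
      have hlen : ((l.take a ++ l.drop (m - a)).length : Int) = (2 * a : Nat) := by
        simp [List.length_append, List.length_take, List.length_drop]
        omega
      rcases eq_or_lt_of_le hka with heq | hlt
      · -- a = k : the loop condition fails, the loop returns the current state
        subst heq
        rw [eightLoop_succ, hlen, if_neg (by omega)]
      · -- k < a : one more pass; the current state has even length 2a ≥ 2
        rw [eightLoop_succ, hlen, if_pos (by omega)]
        have hstep : eightStep (l.take a ++ l.drop (m - a)) =
            l.take (a - 1) ++ l.drop (m - (a - 1)) := by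
          have he := eightStep_even (l.take a ++ l.drop (m - a))
            (by simp [List.length_append, List.length_take, List.length_drop]; omega)
          have hl2 : (l.take a ++ l.drop (m - a)).length = 2 * a := by
            simp [List.length_append, List.length_take, List.length_drop]; omega
          rw [he, hl2]
          have hta : (l.take a).length = a := by simp; omega
          have t1 : (l.take a ++ l.drop (m - a)).take (2 * a / 2 - 1) = l.take (a - 1) := by
            rw [List.take_append_of_le_length (by omega)]
            rw [List.take_take]
            congr 1
            omega
          have t2 : (l.take a ++ l.drop (m - a)).drop (2 * a - (2 * a / 2 - 1)) =
              l.drop (m - (a - 1)) := by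
            rw [drop_append_ge (by omega), hta, List.drop_drop]
            congr 1
            omega
          rw [t1, t2]
        rw [hstep]
        exact ih (a - 1) (by omega) (by omega) (by omega)

-- B's slice pair is the canonical  take keep ++ drop (m - keep)
lemma alt_slices (l : List Char) (keep : Int) (h0 : 0 ≤ keep) (h1 : keep ≤ (l.length : Int)) :
    PySem.List.slice l none (some keep) ++ PySem.List.slice l (some ((l.length : Int) - keep)) none =
      l.take keep.toNat ++ l.drop (l.length - keep.toNat) := by
  rw [PySem.List.slice_to l h0, PySem.List.slice_from l (by omega)]
  have e : ((l.length : Int) - keep).toNat = l.length - keep.toNat := by omega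
  rw [e]

-- ===== VERDICT (by name: the statement is the Claim_ definition above) =====
set_option maxHeartbeats 1000000 in
theorem eight_spec : Claim_equal_eight := by
  intro s num _ hpre
  unfold Spec_eight
  by_cases hneg : num < 1
  · -- num ≤ 0 : the loop condition 0 < num fails at once, A returns the string unchanged
    have h1 : ¬ num = 1 := by omega
    simp only [eight, eight_alt, if_neg h1, if_pos hneg]
    rw [eightLoop_succ, if_neg (by omega)]
    simp
  · by_cases h1 : num = 1
    · -- num == 1 : exactly one step of A; B's closed form produces the same slice pair
      subst h1
      simp only [eight, eight_alt, if_neg hneg]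
      set l := s.toList with hl
      rcases Nat.even_or_odd l.length with he | ho
      · have hme : l.length % 2 = 0 := Nat.even_iff.mp he
        have hmod : ¬ PySem.Int.mod (1 - (l.length : Int)) 2 = 0 := by
          rw [PySem.Int.mod_eq_emod_of_pos (by omega)]; omega
        rw [if_neg hmod,
          PySem.Int.floordiv_eq_ediv_of_pos (by omega : (0:Int) < 2),
          alt_slices l _ (by omega) (by omega),
          eightStep_even l hme]
        have e1 : (max 0 (((l.length : Int) - (1 + 1)) / 2)).toNat = l.length / 2 - 1 := by omega
        rw [e1]
        simp
      · have hmo : l.length % 2 = 1 := Nat.odd_iff.mp ho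
        have hmod : PySem.Int.mod (1 - (l.length : Int)) 2 = 0 := by
          rw [PySem.Int.mod_eq_emod_of_pos (by omega)]; omega
        rw [if_pos hmod,
          PySem.Int.floordiv_eq_ediv_of_pos (by omega : (0:Int) < 2),
          alt_slices l _ (by omega) (by omega),
          eightStep_odd l hmo]
        have e1 : (max 0 (((l.length : Int) - 1) / 2)).toNat = l.length / 2 := by omega
        rw [e1]
        simp
    · -- num ≥ 2 : under Pre_, num ≤ len; the loop ends at keep = (len - num)/2 of the right parity
      have hnum2 : 2 ≤ num := by omega
      simp only [eight, eight_alt, if_neg h1, if_neg hneg]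
      set l := s.toList with hl
      have hle : num ≤ (l.length : Int) := by
        rcases hpre with h | h
        · omega
        · exact h
      have hloop : eightLoop (l.length + 1) (l.length : Int) num l =
          l.take ((l.length - num.toNat) / 2) ++
            l.drop (l.length - (l.length - num.toNat) / 2) := by
        rcases Nat.even_or_odd l.length with he | ho
        · -- even start: l is already in symmetric form with a = len/2
          have hme : l.length % 2 = 0 := Nat.even_iff.mp he
          have hsplit : l.take (l.length / 2) ++ l.drop (l.length - l.length / 2) = l := by
            have e : l.length - l.length / 2 = l.length / 2 := by omega
            rw [e, List.take_append_drop]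
          have hinv := eightLoop_inv l num hnum2 hle (l.length + 1) (l.length / 2)
            (by omega) (by omega) (by omega)
          rw [hsplit] at hinv
          exact hinv
        · -- odd start: the first pass removes the center character, then the even invariant
          have hmo : l.length % 2 = 1 := Nat.odd_iff.mp ho
          rw [eightLoop_succ, if_pos (by omega), eightStep_odd l hmo]
          exact eightLoop_inv l num hnum2 hle l.length (l.length / 2)
            (by omega) (by omega) (by omega)
      rw [hloop]
      by_cases hpar : PySem.Int.mod (num - (l.length : Int)) 2 = 0
      · rw [if_pos hpar]
        rw [PySem.Int.mod_eq_emod_of_pos (by omega)] at hpar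
        rw [PySem.Int.floordiv_eq_ediv_of_pos (a := (l.length : Int) - num) (by omega : (0:Int) < 2),
          alt_slices l (max 0 (((l.length : Int) - num) / 2)) (by omega) (by omega)]
        have e1 : (max 0 (((l.length : Int) - num) / 2)).toNat = (l.length - num.toNat) / 2 := by
          omega
        rw [e1]
      · rw [if_neg hpar]
        rw [PySem.Int.mod_eq_emod_of_pos (by omega)] at hpar
        rw [PySem.Int.floordiv_eq_ediv_of_pos (a := (l.length : Int) - (num + 1)) (by omega : (0:Int) < 2),
          alt_slices l (max 0 (((l.length : Int) - (num + 1)) / 2)) (by omega) (by omega)]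
        have e1 : (max 0 (((l.length : Int) - (num + 1)) / 2)).toNat =
            (l.length - num.toNat) / 2 := by omega
        rw [e1]
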